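-- pv_equiv track=rewrite | github.com/sksmslhy/Java_Lexical_and_Syntax_Analyzer | DFA/LiteralStirng.py | isLiteralString
-- ===== SOURCE A (Python) =====
-- LETTER = ['a', 'b', 'c', 'd', 'e', 'f', 'g', 'h', 'i', 'j', 'k', 'l', 'm', 'n', 'o', 'p', 'q', 'r', 's', 't', 'u', 'v', 'w', 'x', 'y', 'z',
--             'A', 'B', 'C', 'D', 'E', 'F', 'G', 'H', 'I', 'J', 'K', 'L', 'M', 'N', 'O', 'P', 'Q', 'R', 'S', 'T', 'U', 'V', 'W', 'X', 'Y', 'Z']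
--
-- ZERO = ['0']
--
-- NON_ZERO = ['1','2','3','4','5','6','7','8','9']
--
-- WHITE_SPACE = [' ', '\t', '\n', '']
--
-- DOUBLE_QUOTE = ['"']
--
-- def isLiteralString(token) :
--     state = ['T0', 'T1', 'T2', 'T3', 'T4', 'T5', 'T6']
--     locate = state[0]
--     for value in token:
--         if locate == state[0]:
--             if value in DOUBLE_QUOTE :
--                 locate = state[1]
--             else : return False
--         elif locate == state[1] :
--             if value in ZERO :
--                 locate = state[2]
--             elif value in NON_ZERO :
--                 locate = state[3]
--             elif value in LETTER :
--                 locate = state[4]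
--             elif value in WHITE_SPACE :
--                 locate = state[5]
--             else : return False
--         elif locate == state[2] :
--             if value in ZERO :
--                 locate = state[2]
--             elif value in NON_ZERO :
--                 locate = state[3]
--             elif value in LETTER :
--                 locate = state[4]
--             elif value in WHITE_SPACE :
--                 locate = state[5]
--             elif value in DOUBLE_QUOTE :
--                 locate = state[6]
--             else : return False
--         elif locate == state[3] :
--             if value in ZERO :
--                 locate = state[2]
--             elif value in NON_ZERO :
--                 locate = state[3]
--             elif value in LETTER :
--                 locate = state[4]
--             elif value in WHITE_SPACE :
--                 locate = state[5]
--             elif value in DOUBLE_QUOTE :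
--                 locate = state[6]
--             else : return False
--         elif locate == state[4] :
--             if value in ZERO :
--                 locate = state[2]
--             elif value in NON_ZERO :
--                 locate = state[3]
--             elif value in LETTER :
--                 locate = state[4]
--             elif value in WHITE_SPACE :
--                 locate = state[5]
--             elif value in DOUBLE_QUOTE :
--                 locate = state[6]
--             else : return False
--         elif locate == state[5] :
--             if value in ZERO :
--                 locate = state[2]
--             elif value in NON_ZERO :
--                 locate = state[3]
--             elif value in LETTER :
--                 locate = state[4]
--             elif value in WHITE_SPACE :
--                 locate = state[5]
--             elif value in DOUBLE_QUOTE :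
--                 locate = state[6]
--             else : return False
--
--     if locate == state[6]:
--         return True
--     else:
--         return False
-- ===== SOURCE B (Python) =====
-- ALLOWED = "0123456789abcdefghijklmnopqrstuvwxyzABCDEFGHIJKLMNOPQRSTUVWXYZ \t\n"
--
-- def isLiteralString(token):
--     if not token or token[0] != '"':
--         return False
--     body = token[1:]
--     i = 0
--     while i < len(body) and body[i] in ALLOWED:
--         i += 1
--     return 0 < i < len(body) and body[i] == '"'
-- ===== Notes on version B (the rewrite author's own statement) =====
-- stated objective: simpler
-- what changed: Replaced the hand-rolled 7-state DFA (a long if/elif state machine over character-class lists) by a direct two-phase scan: check the opening quote, advance over the maximal run of allowed characters (letters, digits, space/tab/newline), and accept iff that run is nonempty and stops at a closing quote.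
import Mathlib
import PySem

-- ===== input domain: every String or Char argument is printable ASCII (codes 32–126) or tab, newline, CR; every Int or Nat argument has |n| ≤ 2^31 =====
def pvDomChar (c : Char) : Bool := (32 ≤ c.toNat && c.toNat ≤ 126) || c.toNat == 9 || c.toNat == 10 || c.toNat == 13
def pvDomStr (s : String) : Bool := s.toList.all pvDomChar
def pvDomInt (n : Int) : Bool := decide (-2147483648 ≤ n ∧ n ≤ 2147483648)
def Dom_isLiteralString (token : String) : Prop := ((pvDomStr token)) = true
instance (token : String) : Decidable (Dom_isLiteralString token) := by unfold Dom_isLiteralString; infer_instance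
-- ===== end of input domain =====

-- B replaces A's hand-rolled 7-state DFA by a direct two-phase scan (open quote, maximal run of
-- allowed chars, closing quote); objective: simpler, same O(n) cost.

-- ===== PORT A =====
def LETTER : List Char := ['a', 'b', 'c', 'd', 'e', 'f', 'g', 'h', 'i', 'j', 'k', 'l', 'm',
  'n', 'o', 'p', 'q', 'r', 's', 't', 'u', 'v', 'w', 'x', 'y', 'z',
  'A', 'B', 'C', 'D', 'E', 'F', 'G', 'H', 'I', 'J', 'K', 'L', 'M',
  'N', 'O', 'P', 'Q', 'R', 'S', 'T', 'U', 'V', 'W', 'X', 'Y', 'Z']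

def ZERO : List Char := ['0']

def NON_ZERO : List Char := ['1','2','3','4','5','6','7','8','9']

-- Python's WHITE_SPACE also contains '', which a one-character loop value can never equal; exact.
def WHITE_SPACE : List Char := [' ', '\t', '\n']

def DOUBLE_QUOTE : List Char := ['"']

-- the for-loop of A: early 'return False' = false, fall-through (state T6) keeps locate
def dfaLoop (locate : String) : List Char → Bool
  | [] => locate == "T6"
  | v :: rest =>
    if locate == "T0" then
      if DOUBLE_QUOTE.contains v then dfaLoop "T1" rest else false
    else if locate == "T1" then
      if ZERO.contains v then dfaLoop "T2" rest
      else if NON_ZERO.contains v then dfaLoop "T3" rest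
      else if LETTER.contains v then dfaLoop "T4" rest
      else if WHITE_SPACE.contains v then dfaLoop "T5" rest
      else false
    else if locate == "T2" then
      if ZERO.contains v then dfaLoop "T2" rest
      else if NON_ZERO.contains v then dfaLoop "T3" rest
      else if LETTER.contains v then dfaLoop "T4" rest
      else if WHITE_SPACE.contains v then dfaLoop "T5" rest
      else if DOUBLE_QUOTE.contains v then dfaLoop "T6" rest
      else false
    else if locate == "T3" then
      if ZERO.contains v then dfaLoop "T2" rest
      else if NON_ZERO.contains v then dfaLoop "T3" rest
      else if LETTER.contains v then dfaLoop "T4" rest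
      else if WHITE_SPACE.contains v then dfaLoop "T5" rest
      else if DOUBLE_QUOTE.contains v then dfaLoop "T6" rest
      else false
    else if locate == "T4" then
      if ZERO.contains v then dfaLoop "T2" rest
      else if NON_ZERO.contains v then dfaLoop "T3" rest
      else if LETTER.contains v then dfaLoop "T4" rest
      else if WHITE_SPACE.contains v then dfaLoop "T5" rest
      else if DOUBLE_QUOTE.contains v then dfaLoop "T6" rest
      else false
    else if locate == "T5" then
      if ZERO.contains v then dfaLoop "T2" rest
      else if NON_ZERO.contains v then dfaLoop "T3" rest
      else if LETTER.contains v then dfaLoop "T4" rest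
      else if WHITE_SPACE.contains v then dfaLoop "T5" rest
      else if DOUBLE_QUOTE.contains v then dfaLoop "T6" rest
      else false
    else dfaLoop locate rest

def isLiteralString (token : String) : Bool := dfaLoop "T0" token.toList

-- ===== PORT B =====
def ALLOWED : List Char :=
  "0123456789abcdefghijklmnopqrstuvwxyzABCDEFGHIJKLMNOPQRSTUVWXYZ \t\n".toList

-- the while-loop of Source B: length of the maximal allowed prefix of body
def countAllowed : List Char → Nat
  | [] => 0
  | c :: cs => if ALLOWED.contains c then countAllowed cs + 1 else 0

def isLiteralString_alt (token : String) : Bool :=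
  match token.toList with
  | [] => false                       -- 'not token'
  | c :: body =>
    if c != '"' then false            -- token[0] != '"'
    else
      let i := countAllowed body
      -- body[i] is only reached under i < len(body); getD is exact there
      decide (0 < i) && decide (i < body.length) && (body.getD i ' ' == '"')

-- ===== PRECONDITION & SPEC =====
def Spec_isLiteralString (token : String) (out : Bool) : Prop := out = isLiteralString_alt token
instance (token : String) (out : Bool) : Decidable (Spec_isLiteralString token out) := by unfold Spec_isLiteralString; infer_instance

-- ===== CLAIM (what is proved, stated in full; the proofs are below) =====
def Claim_equal_isLiteralString : Prop := ∀ (token : String), Dom_isLiteralString token → Spec_isLiteralString token (isLiteralString token)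

-- ===== LEMMAS AND PROOFS =====

theorem allowed_eq : ALLOWED = ZERO ++ NON_ZERO ++ LETTER ++ WHITE_SPACE := by decide

theorem allowed_mem (v : Char) :
    v ∈ ALLOWED ↔ v ∈ ZERO ∨ v ∈ NON_ZERO ∨ v ∈ LETTER ∨ v ∈ WHITE_SPACE := by
  simp [allowed_eq]

theorem loopT6 (cs : List Char) : dfaLoop "T6" cs = true := by
  induction cs with
  | nil => decide
  | cons v rest ih => simp [dfaLoop, ih]

-- result of the DFA from any content state T2..T5
def contScan (cs : List Char) : Bool :=
  decide (countAllowed cs < cs.length) && (cs.getD (countAllowed cs) ' ' == '"')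

theorem contScan_cons_allowed (v : Char) (rest : List Char)
    (h : v ∈ ALLOWED) : contScan (v :: rest) = contScan rest := by
  have hc : countAllowed (v :: rest) = countAllowed rest + 1 := by
    simp [countAllowed, h]
  simp [contScan, hc]

theorem contScan_cons_not (v : Char) (rest : List Char)
    (h : v ∉ ALLOWED) : contScan (v :: rest) = (v == '"') := by
  have hc : countAllowed (v :: rest) = 0 := by simp [countAllowed, h]
  simp [contScan, hc]

theorem loopContent (cs : List Char) :
    (dfaLoop "T2" cs = contScan cs) ∧ (dfaLoop "T3" cs = contScan cs) ∧
    (dfaLoop "T4" cs = contScan cs) ∧ (dfaLoop "T5" cs = contScan cs) := by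
  induction cs with
  | nil => decide
  | cons v rest ih =>
    obtain ⟨i2, i3, i4, i5⟩ := ih
    by_cases h0 : v ∈ ZERO
    · have hcs := contScan_cons_allowed v rest ((allowed_mem v).mpr (Or.inl h0))
      refine ⟨?_, ?_, ?_, ?_⟩ <;> simp [dfaLoop, h0, hcs, i2]
    · by_cases h1 : v ∈ NON_ZERO
      · have hcs := contScan_cons_allowed v rest
          ((allowed_mem v).mpr (Or.inr (Or.inl h1)))
        refine ⟨?_, ?_, ?_, ?_⟩ <;> simp [dfaLoop, h0, h1, hcs, i3]
      · by_cases hL : v ∈ LETTER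
        · have hcs := contScan_cons_allowed v rest
            ((allowed_mem v).mpr (Or.inr (Or.inr (Or.inl hL))))
          refine ⟨?_, ?_, ?_, ?_⟩ <;> simp [dfaLoop, h0, h1, hL, hcs, i4]
        · by_cases hW : v ∈ WHITE_SPACE
          · have hcs := contScan_cons_allowed v rest
              ((allowed_mem v).mpr (Or.inr (Or.inr (Or.inr hW))))
            refine ⟨?_, ?_, ?_, ?_⟩ <;> simp [dfaLoop, h0, h1, hL, hW, hcs, i5]
          · have hall : v ∉ ALLOWED := by
              rw [allowed_mem]
              simp [h0, h1, hL, hW]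
            have hcs := contScan_cons_not v rest hall
            by_cases hQ : v ∈ DOUBLE_QUOTE
            · have hv : v = '"' := by simpa [DOUBLE_QUOTE] using hQ
              subst hv
              refine ⟨?_, ?_, ?_, ?_⟩ <;>
                simp [dfaLoop, hcs, loopT6, ZERO, NON_ZERO, LETTER, WHITE_SPACE, DOUBLE_QUOTE]
            · have hv : (v == '"') = false := by
                simpa [DOUBLE_QUOTE] using hQ
              refine ⟨?_, ?_, ?_, ?_⟩ <;>
                simp [dfaLoop, h0, h1, hL, hW, hQ, hcs, hv]

theorem loopT1 (body : List Char) :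
    dfaLoop "T1" body =
      (decide (0 < countAllowed body) && decide (countAllowed body < body.length) &&
        (body.getD (countAllowed body) ' ' == '"')) := by
  cases body with
  | nil => decide
  | cons v rest =>
    by_cases h0 : v ∈ ZERO
    · have hall : v ∈ ALLOWED := (allowed_mem v).mpr (Or.inl h0)
      have := (loopContent rest).1
      simp [dfaLoop, h0, this, countAllowed, hall, contScan]
    · by_cases h1 : v ∈ NON_ZERO
      · have hall : v ∈ ALLOWED := (allowed_mem v).mpr (Or.inr (Or.inl h1))
        have := (loopContent rest).2.1
        simp [dfaLoop, h0, h1, this, countAllowed, hall, contScan]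
      · by_cases hL : v ∈ LETTER
        · have hall : v ∈ ALLOWED := (allowed_mem v).mpr (Or.inr (Or.inr (Or.inl hL)))
          have := (loopContent rest).2.2.1
          simp [dfaLoop, h0, h1, hL, this, countAllowed, hall, contScan]
        · by_cases hW : v ∈ WHITE_SPACE
          · have hall : v ∈ ALLOWED := (allowed_mem v).mpr (Or.inr (Or.inr (Or.inr hW)))
            have := (loopContent rest).2.2.2
            simp [dfaLoop, h0, h1, hL, hW, this, countAllowed, hall, contScan]
          · have hall : v ∉ ALLOWED := by
              rw [allowed_mem]; simp [h0, h1, hL, hW]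
            simp [dfaLoop, h0, h1, hL, hW, countAllowed, hall]

-- ===== VERDICT (by name: the statement is the Claim_ definition above) =====
theorem isLiteralString_spec : Claim_equal_isLiteralString := by
  intro token _
  unfold Spec_isLiteralString isLiteralString isLiteralString_alt
  cases h : token.toList with
  | nil => simp [dfaLoop]
  | cons c body =>
    by_cases hc : c = '"'
    · subst hc
      simp [dfaLoop, DOUBLE_QUOTE, loopT1]
    · simp [dfaLoop, DOUBLE_QUOTE, hc]
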